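-- pv_equiv track=rewrite | github.com/alexandraback/datacollection | solutions_5648941810974720_1/Python/flavr/1exo.py | remove_from
-- ===== SOURCE A (Python) =====
-- def remove_from(line, number):
--     j = 0
--     for i, c in enumerate(number):
--         j = 0
--         while j < len(line):
--             if line[j] == c:
--                 line[j] = None
--                 j += 1
--                 break
--             j += 1
--
--     return [x for x in line if x is not None]
-- ===== SOURCE B (Python) =====
-- def remove_from(line, number):
--     # One pass: count needed removals per char, then filter line once (O(n+m));
--     # unlike A, does not mutate `line` (return-value equivalence only).
--     need = {}
--     for c in number:
--         need[c] = need.get(c, 0) + 1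
--     out = []
--     for x in line:
--         if need.get(x, 0) > 0:
--             need[x] = need[x] - 1
--         else:
--             out.append(x)
--     return out
-- ===== Notes on version B (the rewrite author's own statement) =====
-- stated objective: faster
-- what changed: Replaces A's per-character rescan of line (one left-to-right search per char of number, marking cells None) with a dict of needed removal counts built once from number and a single filtering pass over line.
import Mathlib
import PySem

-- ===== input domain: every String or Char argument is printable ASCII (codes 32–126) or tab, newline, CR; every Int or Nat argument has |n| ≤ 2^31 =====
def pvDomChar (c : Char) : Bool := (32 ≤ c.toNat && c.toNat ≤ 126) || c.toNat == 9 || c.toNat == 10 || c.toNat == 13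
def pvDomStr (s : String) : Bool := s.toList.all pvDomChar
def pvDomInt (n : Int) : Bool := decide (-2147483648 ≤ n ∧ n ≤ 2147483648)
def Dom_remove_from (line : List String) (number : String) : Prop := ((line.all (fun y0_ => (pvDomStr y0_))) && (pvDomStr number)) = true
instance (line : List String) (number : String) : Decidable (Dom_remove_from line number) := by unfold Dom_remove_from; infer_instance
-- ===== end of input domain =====

-- B replaces A's per-digit rescans of `line` by a counting dict and a single filtering pass
-- (objective: faster). A mutates `line` in place; B does not — equivalence is about the RETURN value.

-- ===== PORT A =====
-- A's inner while-loop: scan left to right, blank out (None) the first cell equal to c, then break.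
def pyRemoveFirst (c : String) : List (Option String) → List (Option String)
  | [] => []
  | x :: rest => if x = some c then none :: rest else x :: pyRemoveFirst c rest

def remove_from (line : List String) (number : String) : List String :=
  (number.toList.foldl (fun st ch => pyRemoveFirst (String.ofList [ch]) st) (line.map some)).filterMap id

-- ===== PORT B =====
def remove_from_alt (line : List String) (number : String) : List String :=
  let need := number.toList.foldl
    (fun d ch => d.insert (String.ofList [ch]) (d.getD (String.ofList [ch]) 0 + 1))
    (PySem.Dict.empty : PySem.Dict String Int)
  (line.foldl
    (fun (st : PySem.Dict String Int × List String) x =>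
      if st.1.getD x 0 > 0 then (st.1.insert x (st.1.getD x 0 - 1), st.2)
      else (st.1, st.2 ++ [x]))
    (need, [])).2

-- ===== PRECONDITION & SPEC =====
def Spec_remove_from (line : List String) (number : String) (out : List String) : Prop := out = remove_from_alt line number
instance (line : List String) (number : String) (out : List String) : Decidable (Spec_remove_from line number out) := by unfold Spec_remove_from; infer_instance

-- ===== CLAIM (what is proved, stated in full; the proofs are below) =====
def Claim_equal_remove_from : Prop := ∀ (line : List String) (number : String), Dom_remove_from line number → Spec_remove_from line number (remove_from line number)

-- ===== LEMMAS AND PROOFS =====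

-- remove the first character of cs whose one-char string is x (mirrors one successful A-scan)
def eraseFirstC (x : String) : List Char → List Char
  | [] => []
  | c :: cs => if String.ofList [c] = x then cs else c :: eraseFirstC x cs

theorem foldl_pyRemoveFirst_nil (cs : List Char) :
    cs.foldl (fun st ch => pyRemoveFirst (String.ofList [ch]) st) [] = [] := by
  induction cs with
  | nil => rfl
  | cons c cs ih => simpa [pyRemoveFirst] using ih

theorem foldl_pyRemoveFirst_none (cs : List Char) (st : List (Option String)) :
    cs.foldl (fun st ch => pyRemoveFirst (String.ofList [ch]) st) (none :: st)
      = none :: cs.foldl (fun st ch => pyRemoveFirst (String.ofList [ch]) st) st := by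
  induction cs generalizing st with
  | nil => rfl
  | cons c cs ih => simpa [pyRemoveFirst] using ih _

theorem foldl_pyRemoveFirst_cons (cs : List Char) (x : String) (st : List (Option String)) :
    cs.foldl (fun st ch => pyRemoveFirst (String.ofList [ch]) st) (some x :: st)
      = (if x ∈ cs.map (fun c => String.ofList [c]) then none else some x)
        :: (eraseFirstC x cs).foldl (fun st ch => pyRemoveFirst (String.ofList [ch]) st) st := by
  induction cs generalizing st with
  | nil => simp [eraseFirstC]
  | cons c cs ih =>
    by_cases h : String.ofList [c] = x
    · simp [pyRemoveFirst, eraseFirstC, h, foldl_pyRemoveFirst_none]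
    · have h' : ¬ (x = String.ofList [c]) := fun he => h he.symm
      simp [pyRemoveFirst, eraseFirstC, h, h', ih]

theorem count_eraseFirstC_self (x : String) (cs : List Char)
    (h : x ∈ cs.map (fun c => String.ofList [c])) :
    (cs.map (fun c => String.ofList [c])).count x
      = ((eraseFirstC x cs).map (fun c => String.ofList [c])).count x + 1 := by
  induction cs with
  | nil => simp at h
  | cons c cs ih =>
    by_cases hc : String.ofList [c] = x
    · simp [eraseFirstC, hc]
    · have h' : x ∈ cs.map (fun c => String.ofList [c]) := by
        rw [List.map_cons] at h
        rcases List.mem_cons.mp h with h' | h'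
        · exact absurd h'.symm hc
        · exact h'
      simp [eraseFirstC, hc, ih h']

theorem count_eraseFirstC_ne (x v : String) (cs : List Char) (hvx : v ≠ x) :
    ((eraseFirstC x cs).map (fun c => String.ofList [c])).count v
      = (cs.map (fun c => String.ofList [c])).count v := by
  induction cs with
  | nil => rfl
  | cons c cs ih =>
    by_cases hc : String.ofList [c] = x
    · have h3 : ¬ (x = v) := fun he => hvx he.symm
      simp [eraseFirstC, hc, h3]
    · simp [eraseFirstC, hc, List.count_cons, ih]

theorem eraseFirstC_of_not_mem (x : String) (cs : List Char)
    (h : x ∉ cs.map (fun c => String.ofList [c])) : eraseFirstC x cs = cs := by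
  induction cs with
  | nil => rfl
  | cons c cs ih =>
    rw [List.map_cons] at h
    have hc : ¬ (String.ofList [c] = x) := by intro he; exact h (by simp [← he])
    simp [eraseFirstC, hc, ih (fun hm => h (List.mem_cons_of_mem _ hm))]

theorem main_invariant (line : List String) (cs : List Char)
    (need : PySem.Dict String Int) (out0 : List String)
    (hinv : ∀ v, need.getD v 0 = ((cs.map (fun c => String.ofList [c])).count v : Int)) :
    (line.foldl
      (fun (st : PySem.Dict String Int × List String) x =>
        if st.1.getD x 0 > 0 then (st.1.insert x (st.1.getD x 0 - 1), st.2)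
        else (st.1, st.2 ++ [x]))
      (need, out0)).2
    = out0 ++ (cs.foldl (fun st ch => pyRemoveFirst (String.ofList [ch]) st) (line.map some)).filterMap id := by
  induction line generalizing cs need out0 with
  | nil => simp [foldl_pyRemoveFirst_nil cs]
  | cons x rest ih =>
    simp only [List.map_cons, List.foldl_cons, foldl_pyRemoveFirst_cons]
    by_cases hpos : need.getD x 0 > 0
    · have hmem : x ∈ cs.map (fun c => String.ofList [c]) := by
        by_contra hmem
        have : (cs.map (fun c => String.ofList [c])).count x = 0 := List.count_eq_zero.mpr hmem
        rw [hinv x, this] at hpos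
        exact absurd hpos (by norm_num)
      have hinv' : ∀ v, (need.insert x (need.getD x 0 - 1)).getD v 0
          = (((eraseFirstC x cs).map (fun c => String.ofList [c])).count v : Int) := by
        intro v
        rw [PySem.Dict.getD_insert]
        by_cases hv : v = x
        · subst hv
          rw [if_pos rfl, hinv v, count_eraseFirstC_self v cs hmem]
          push_cast; ring
        · rw [if_neg hv, hinv v, count_eraseFirstC_ne x v cs hv]
      rw [if_pos hpos, if_pos hmem]
      simpa using ih (eraseFirstC x cs) _ out0 hinv'
    · have hmem : x ∉ cs.map (fun c => String.ofList [c]) := by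
        intro hmem
        have h1 : 0 < (cs.map (fun c => String.ofList [c])).count x := List.count_pos_iff.mpr hmem
        have := hinv x
        omega
      rw [if_neg hpos, if_neg hmem, eraseFirstC_of_not_mem x cs hmem]
      rw [ih cs need (out0 ++ [x]) hinv]
      simp

-- ===== VERDICT (by name: the statement is the Claim_ definition above) =====
theorem remove_from_spec : Claim_equal_remove_from := by
  intro line number _
  unfold Spec_remove_from remove_from remove_from_alt
  symm
  apply main_invariant
  intro v
  have : number.toList.foldl
      (fun d ch => d.insert (String.ofList [ch]) (d.getD (String.ofList [ch]) 0 + 1))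
      (PySem.Dict.empty : PySem.Dict String Int)
    = (number.toList.map (fun c => String.ofList [c])).foldl
        (fun d x => d.insert x (d.getD x 0 + 1)) (PySem.Dict.empty : PySem.Dict String Int) := by
    rw [List.foldl_map]
  rw [this, PySem.Dict.getD_foldl_insert_add_one]
  simp
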